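-- pv_equiv track=rewrite | github.com/PavelHulevich/Homeworks | Homework-4/task10.py | check_chars
-- ===== SOURCE A (Python) =====
-- def check_chars(list_chars, password):  # проверка все ли символы пароля в одном регистре
--     summ_chars = 0
--     for index in password:
--         if index in list_chars:
--             summ_chars += 1
--     if summ_chars == len(password):
--         return False                    # все символы в одном регистре
--     return True                         # не все символы в одном регистре
-- ===== SOURCE B (Python) =====
-- def check_chars(list_chars, password):
--     # set-difference formulation: some password char lies outside the allowed set?
--     return bool(set(password) - set(list_chars))
-- ===== Notes on version B (the rewrite author's own statement) =====
-- stated objective: idiomatic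
-- what changed: Replaces the per-character counting loop and count==len(password) comparison with a single set-difference emptiness test (bool(set(password) - set(list_chars))).
import Mathlib
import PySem

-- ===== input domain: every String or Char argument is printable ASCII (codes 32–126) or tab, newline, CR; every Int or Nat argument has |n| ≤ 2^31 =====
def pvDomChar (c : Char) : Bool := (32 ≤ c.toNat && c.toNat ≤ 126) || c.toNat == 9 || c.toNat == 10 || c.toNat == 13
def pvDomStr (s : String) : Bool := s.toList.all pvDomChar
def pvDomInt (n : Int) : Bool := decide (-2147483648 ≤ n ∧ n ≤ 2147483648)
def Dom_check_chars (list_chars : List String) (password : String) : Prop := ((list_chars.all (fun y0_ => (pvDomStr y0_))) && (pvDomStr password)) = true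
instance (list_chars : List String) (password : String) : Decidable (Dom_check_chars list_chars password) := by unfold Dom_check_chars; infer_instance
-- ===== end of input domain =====

-- B replaces A's per-character counting loop and count-vs-length test with a set-difference emptiness check (idiomatic).


-- ===== PORT A =====
def check_chars (list_chars : List String) (password : String) : Bool :=
  let summ_chars : Nat :=
    password.toList.foldl
      (fun summ c => if list_chars.contains (String.ofList [c]) then summ + 1 else summ) 0
  if summ_chars = password.toList.length then false else true

-- ===== PORT B =====
def check_chars_alt (list_chars : List String) (password : String) : Bool :=
  !(PySem.Set.diff (PySem.Set.ofList (password.toList.map (fun c => String.ofList [c])))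
      (PySem.Set.ofList list_chars)).isEmpty

-- ===== PRECONDITION & SPEC =====
def Spec_check_chars (list_chars : List String) (password : String) (out : Bool) : Prop := out = check_chars_alt list_chars password
instance (list_chars : List String) (password : String) (out : Bool) : Decidable (Spec_check_chars list_chars password out) := by unfold Spec_check_chars; infer_instance

-- ===== CLAIM (what is proved, stated in full; the proofs are below) =====
def Claim_equal_check_chars : Prop := ∀ (list_chars : List String) (password : String), Dom_check_chars list_chars password → Spec_check_chars list_chars password (check_chars list_chars password)

-- ===== LEMMAS AND PROOFS =====
theorem foldl_count (p : String → Bool) (l : List Char) (n : Nat) :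
    l.foldl (fun s c => if p (String.ofList [c]) then s + 1 else s) n
      = n + l.countP (fun c => p (String.ofList [c])) := by
  induction l generalizing n with
  | nil => simp
  | cons c t ih =>
    simp only [List.foldl_cons, List.countP_cons, ih]
    by_cases h : p (String.ofList [c]) = true <;> simp [h] <;> omega

theorem checkA_iff (list_chars : List String) (password : String) :
    check_chars list_chars password = true ↔
      ¬ ∀ c ∈ password.toList, list_chars.contains (String.ofList [c]) = true := by
  unfold check_chars
  simp only [foldl_count, Nat.zero_add]
  split_ifs with h
  · simp only [false_iff, not_not]
    exact List.countP_eq_length.mp h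
  · simp only [true_iff]
    exact fun hall => h (List.countP_eq_length.mpr hall)

theorem checkB_iff (list_chars : List String) (password : String) :
    check_chars_alt list_chars password = true ↔
      ¬ ∀ c ∈ password.toList, list_chars.contains (String.ofList [c]) = true := by
  unfold check_chars_alt
  rw [Bool.not_eq_eq_eq_not, Bool.not_true, List.isEmpty_eq_false_iff_exists_mem]
  constructor
  · rintro ⟨s, hs⟩ hall
    rw [PySem.Set.mem_diff, PySem.Set.mem_ofList, PySem.Set.mem_ofList, List.mem_map] at hs
    obtain ⟨⟨c, hc, rfl⟩, hnot⟩ := hs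
    exact hnot (List.contains_iff_mem.mp (hall c hc))
  · intro hnall
    rcases not_forall.mp hnall with ⟨c, hc⟩
    rcases Classical.not_imp.mp hc with ⟨hcmem, hnotin⟩
    refine ⟨String.ofList [c], ?_⟩
    rw [PySem.Set.mem_diff, PySem.Set.mem_ofList, PySem.Set.mem_ofList, List.mem_map]
    exact ⟨⟨c, hcmem, rfl⟩, fun h => hnotin (List.contains_iff_mem.mpr h)⟩

-- ===== VERDICT (by name: the statement is the Claim_ definition above) =====
theorem check_chars_spec : Claim_equal_check_chars := by
  intro list_chars password _
  unfold Spec_check_chars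
  rw [Bool.eq_iff_iff, checkA_iff, checkB_iff]
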